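-- pv_equiv track=rewrite | github.com/BOUALILILila/hybridseq2seq | hybridseq2seq/data/parsers/semantic_parser_old.py | map_char_to_token_pos
-- ===== SOURCE A (Python) =====
-- def map_char_to_token_pos(sent):
--     char_to_token_map = []
--     token_pos = 0
--     for char in sent:
--         if char != " ":
--             char_to_token_map.append(token_pos)
--         else:
--             char_to_token_map.append(-1)
--             token_pos += 1
--     return char_to_token_map
-- ===== SOURCE B (Python) =====
-- def map_char_to_token_pos(sent):
--     out = []
--     for i, word in enumerate(sent.split(' ')):
--         if i > 0:
--             out.append(-1)
--         out.extend([i] * len(word))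
--     return out
-- ===== Notes on version B (the rewrite author's own statement) =====
-- stated objective: alternative
-- what changed: B splits the sentence on single spaces and emits whole character-runs ([i]*len(word)) per token with a -1 separator before each word after the first, instead of scanning characters one at a time while incrementing a counter.
import Mathlib
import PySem

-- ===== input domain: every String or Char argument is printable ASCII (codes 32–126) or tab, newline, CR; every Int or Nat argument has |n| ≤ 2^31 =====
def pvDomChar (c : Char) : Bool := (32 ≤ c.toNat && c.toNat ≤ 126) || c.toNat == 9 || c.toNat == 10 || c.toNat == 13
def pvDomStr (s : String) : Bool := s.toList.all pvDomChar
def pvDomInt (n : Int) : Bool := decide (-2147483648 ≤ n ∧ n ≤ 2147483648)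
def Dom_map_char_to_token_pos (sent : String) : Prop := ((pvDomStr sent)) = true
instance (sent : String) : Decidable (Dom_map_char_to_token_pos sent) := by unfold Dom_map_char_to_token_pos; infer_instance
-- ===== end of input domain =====

-- B splits the sentence on single spaces and emits whole character-runs per token
-- (a -1 before each word after the first) instead of scanning characters with a counter. Same cost, different decomposition.

-- ===== PORT A =====
-- for char in sent: append token_pos for a non-space, else append -1 and bump token_pos
def map_char_to_token_pos (sent : String) : List Int :=
  (sent.toList.foldl
    (fun (st : List Int × Int) c =>
      if c ≠ ' ' then (st.1 ++ [st.2], st.2) else (st.1 ++ [-1], st.2 + 1))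
    ([], 0)).1

-- ===== PORT B =====
-- the loop "for i, word in enumerate(words): if i > 0: append -1; extend [i]*len(word)"
-- as structural recursion carrying the word index i
def pvEmit : Nat → List (List Char) → List Int
  | _, [] => []
  | i, w :: ws => (if 0 < i then [-1] else []) ++ List.replicate w.length (i : Int) ++ pvEmit (i + 1) ws

def map_char_to_token_pos_alt (sent : String) : List Int :=
  pvEmit 0 (PySem.Chars.splitOn sent.toList [' '])   -- sent.split(' ')

-- ===== PRECONDITION & SPEC =====
def Spec_map_char_to_token_pos (sent : String) (out : List Int) : Prop := out = map_char_to_token_pos_alt sent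
instance (sent : String) (out : List Int) : Decidable (Spec_map_char_to_token_pos sent out) := by unfold Spec_map_char_to_token_pos; infer_instance

-- ===== CLAIM (what is proved, stated in full; the proofs are below) =====
def Claim_equal_map_char_to_token_pos : Prop := ∀ (sent : String), Dom_map_char_to_token_pos sent → Spec_map_char_to_token_pos sent (map_char_to_token_pos sent)

-- ===== LEMMAS AND PROOFS =====

-- A's loop as plain structural recursion (proof helper)
def pvMapA : List Char → Int → List Int
  | [], _ => []
  | c :: rest, i => if c ≠ ' ' then i :: pvMapA rest i else (-1) :: pvMapA rest (i + 1)

theorem pvFoldA (l : List Char) (acc : List Int) (i : Int) :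
    (l.foldl
      (fun (st : List Int × Int) c =>
        if c ≠ ' ' then (st.1 ++ [st.2], st.2) else (st.1 ++ [-1], st.2 + 1))
      (acc, i)).1 = acc ++ pvMapA l i := by
  induction l generalizing acc i with
  | nil => simp [pvMapA]
  | cons c rest ih =>
    by_cases h : c = ' '
    · simp only [List.foldl_cons, if_neg (not_not_intro h)]
      rw [ih]
      simp [pvMapA, h]
    · simp only [List.foldl_cons, if_pos h]
      rw [ih]
      simp [pvMapA, h]

-- single-space split as plain structural recursion (proof helper)
def pvSplitSp : List Char → List (List Char)
  | [] => [[]]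
  | c :: rest =>
    if c = ' ' then [] :: pvSplitSp rest
    else
      match pvSplitSp rest with
      | w :: ws => (c :: w) :: ws
      | [] => [[c]]

theorem pvSplitSp_ne_nil (l : List Char) : pvSplitSp l ≠ [] := by
  cases l with
  | nil => simp [pvSplitSp]
  | cons c rest =>
    simp only [pvSplitSp]
    split
    · simp
    · split <;> simp

def pvConsHead (pre : List Char) : List (List Char) → List (List Char)
  | [] => [pre]
  | w :: ws => (pre ++ w) :: ws

theorem pvGo_eq (fuel : Nat) (l cur : List Char) (acc : List (List Char))
    (hf : l.length < fuel) :
    PySem.Chars.splitOn.go [' '] fuel l cur acc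
      = acc.reverse ++ pvConsHead cur.reverse (pvSplitSp l) := by
  induction fuel generalizing l cur acc with
  | zero => omega
  | succ n ih =>
    cases l with
    | nil =>
      rw [PySem.Chars.splitOn.go]
      simp [pvSplitSp, pvConsHead]
      omega
    | cons c rest =>
      rw [PySem.Chars.splitOn.go]
      by_cases h : c = ' '
      · subst h
        have hp : List.isPrefixOf [' '] (' ' :: rest) = true := by
          simp [List.isPrefixOf]
        rw [if_pos hp]
        have hr : rest.length < n := by simpa using hf
        rw [show List.drop [' '].length (' ' :: rest) = rest from rfl]
        rw [ih _ _ _ hr]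
        obtain ⟨w, ws, hws⟩ : ∃ w ws, pvSplitSp rest = w :: ws := by
          cases hsp : pvSplitSp rest with
          | nil => exact absurd hsp (pvSplitSp_ne_nil rest)
          | cons w ws => exact ⟨w, ws, rfl⟩
        simp [pvSplitSp, hws, pvConsHead]
      · have hp : List.isPrefixOf [' '] (c :: rest) = false := by
          simp [List.isPrefixOf, Ne.symm h]
        rw [if_neg (by simp [hp])]
        have hr : rest.length < n := by simpa using Nat.lt_of_succ_lt_succ hf
        rw [ih _ _ _ hr]
        obtain ⟨w, ws, hws⟩ : ∃ w ws, pvSplitSp rest = w :: ws := by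
          cases hsp : pvSplitSp rest with
          | nil => exact absurd hsp (pvSplitSp_ne_nil rest)
          | cons w ws => exact ⟨w, ws, rfl⟩
        simp [pvSplitSp, h, hws, pvConsHead]

theorem pvSplitOn_eq (l : List Char) :
    PySem.Chars.splitOn l [' '] = pvSplitSp l := by
  have h := pvGo_eq (l.length + 1) l [] [] (by omega)
  rw [PySem.Chars.splitOn] at *
  rw [h]
  obtain ⟨w, ws, hws⟩ : ∃ w ws, pvSplitSp l = w :: ws := by
    cases hsp : pvSplitSp l with
    | nil => exact absurd hsp (pvSplitSp_ne_nil l)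
    | cons w ws => exact ⟨w, ws, rfl⟩
  simp [hws, pvConsHead]

theorem pvMain (l : List Char) (i : Nat) (w : List Char) (ws : List (List Char))
    (hsp : pvSplitSp l = w :: ws) :
    pvMapA l (i : Int) = List.replicate w.length (i : Int) ++ pvEmit (i + 1) ws := by
  induction l generalizing i w ws with
  | nil =>
    simp [pvSplitSp] at hsp
    obtain ⟨hw, hws⟩ := hsp
    subst hw; subst hws
    simp [pvMapA, pvEmit]
  | cons c rest ih =>
    by_cases h : c = ' '
    · subst h
      obtain ⟨w', ws', hws'⟩ : ∃ w' ws', pvSplitSp rest = w' :: ws' := by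
        cases hsp2 : pvSplitSp rest with
        | nil => exact absurd hsp2 (pvSplitSp_ne_nil rest)
        | cons a b => exact ⟨a, b, rfl⟩
      rw [show pvSplitSp (' ' :: rest) = [] :: pvSplitSp rest from by simp [pvSplitSp], hws'] at hsp
      obtain ⟨hw, hws⟩ := List.cons_eq_cons.mp hsp
      subst hw; subst hws
      have := ih (i + 1) w' ws' hws'
      push_cast at this
      simp [pvMapA, pvEmit, this]
    · simp only [pvSplitSp, if_neg h] at hsp
      obtain ⟨w', ws', hws'⟩ : ∃ w' ws', pvSplitSp rest = w' :: ws' := by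
        cases hsp2 : pvSplitSp rest with
        | nil => exact absurd hsp2 (pvSplitSp_ne_nil rest)
        | cons a b => exact ⟨a, b, rfl⟩
      rw [hws'] at hsp
      obtain ⟨hw, hws⟩ := List.cons.injEq _ _ _ _ ▸ hsp
      subst hw; subst hws
      have := ih i w' ws' hws'
      simp [pvMapA, h, this, List.replicate_succ]

-- ===== VERDICT (by name: the statement is the Claim_ definition above) =====
theorem map_char_to_token_pos_spec : Claim_equal_map_char_to_token_pos := by
  intro sent _
  unfold Spec_map_char_to_token_pos map_char_to_token_pos map_char_to_token_pos_alt
  rw [pvFoldA, pvSplitOn_eq]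
  obtain ⟨w, ws, hws⟩ : ∃ w ws, pvSplitSp sent.toList = w :: ws := by
    cases hsp : pvSplitSp sent.toList with
    | nil => exact absurd hsp (pvSplitSp_ne_nil _)
    | cons a b => exact ⟨a, b, rfl⟩
  rw [hws]
  have := pvMain sent.toList 0 w ws hws
  simpa [pvEmit] using this
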